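-- pv_equiv track=rewrite | github.com/hershe07/disease-dashboard-1 | layer6/sink_pipeline.py | _clinical_group
-- ===== SOURCE A (Python) =====
-- def _clinical_group(feature: str) -> str:
--     """Map feature names to clinical groups for Tableau colour-coding."""
--     groups = {
--         "blood_pressure": ["systolic_bp","diastolic_bp","bp_pulse_pressure",
--                            "bp_stage","bp_hypertension_flag","bp_category_enc"],
--         "metabolic":      ["bmi","bmi_category_enc","abdominal_circ_cm",
--                            "metabolic_syndrome_score","weight_kg"],
--         "glucose":        ["fasting_glucose","glucose_category_enc","diabetes_enc"],
--         "lipids":         ["total_cholesterol","hdl","estimated_ldl","chol_hdl_ratio"],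
--         "lifestyle":      ["smoking_enc","activity_enc","family_history_cvd"],
--         "demographics":   ["age","sex_enc","age_group_risk_multiplier"],
--         "population":     ["pop_bp_prevalence","pop_diabetes_prevalence",
--                            "pop_obesity_prevalence","pop_physical_inactivity",
--                            "pop_tobacco_prevalence","wb_urban_pct",
--                            "wb_health_expenditure_gdp","wb_diabetes_prevalence"],
--         "environment":    ["pm25_latest","pm10_latest","no2_latest","o3_latest"],
--     }
--     for group, features in groups.items():
--         if feature in features:
--             return group
--     return "other"
-- ===== SOURCE B (Python) =====
-- # Binary search over a key-sorted flat (feature, group) table instead of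
-- # scanning the group lists one by one.
--
-- _TABLE = (
--     ("abdominal_circ_cm", "metabolic"),
--     ("activity_enc", "lifestyle"),
--     ("age", "demographics"),
--     ("age_group_risk_multiplier", "demographics"),
--     ("bmi", "metabolic"),
--     ("bmi_category_enc", "metabolic"),
--     ("bp_category_enc", "blood_pressure"),
--     ("bp_hypertension_flag", "blood_pressure"),
--     ("bp_pulse_pressure", "blood_pressure"),
--     ("bp_stage", "blood_pressure"),
--     ("chol_hdl_ratio", "lipids"),
--     ("diabetes_enc", "glucose"),
--     ("diastolic_bp", "blood_pressure"),
--     ("estimated_ldl", "lipids"),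
--     ("family_history_cvd", "lifestyle"),
--     ("fasting_glucose", "glucose"),
--     ("glucose_category_enc", "glucose"),
--     ("hdl", "lipids"),
--     ("metabolic_syndrome_score", "metabolic"),
--     ("no2_latest", "environment"),
--     ("o3_latest", "environment"),
--     ("pm10_latest", "environment"),
--     ("pm25_latest", "environment"),
--     ("pop_bp_prevalence", "population"),
--     ("pop_diabetes_prevalence", "population"),
--     ("pop_obesity_prevalence", "population"),
--     ("pop_physical_inactivity", "population"),
--     ("pop_tobacco_prevalence", "population"),
--     ("sex_enc", "demographics"),
--     ("smoking_enc", "lifestyle"),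
--     ("systolic_bp", "blood_pressure"),
--     ("total_cholesterol", "lipids"),
--     ("wb_diabetes_prevalence", "population"),
--     ("wb_health_expenditure_gdp", "population"),
--     ("wb_urban_pct", "population"),
--     ("weight_kg", "metabolic"),
-- )
--
--
-- def _bsearch(table, feature):
--     if not table:
--         return "other"
--     mid = len(table) // 2
--     key, group = table[mid]
--     if feature == key:
--         return group
--     if feature < key:
--         return _bsearch(table[:mid], feature)
--     return _bsearch(table[mid + 1:], feature)
--
--
-- def _clinical_group(feature: str) -> str:
--     """Map feature names to clinical groups for Tableau colour-coding."""
--     return _bsearch(_TABLE, feature)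
-- ===== Notes on version B (the rewrite author's own statement) =====
-- stated objective: alternative
-- what changed: Replaces A's linear scan over the groups dict (a membership test against each group's feature list) with binary search over a single flat (feature, group) table sorted by key, recursively halving the table; correct because the table holds exactly A's feature->group pairs with distinct keys, so first-match and sorted search agree.
import Mathlib
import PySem

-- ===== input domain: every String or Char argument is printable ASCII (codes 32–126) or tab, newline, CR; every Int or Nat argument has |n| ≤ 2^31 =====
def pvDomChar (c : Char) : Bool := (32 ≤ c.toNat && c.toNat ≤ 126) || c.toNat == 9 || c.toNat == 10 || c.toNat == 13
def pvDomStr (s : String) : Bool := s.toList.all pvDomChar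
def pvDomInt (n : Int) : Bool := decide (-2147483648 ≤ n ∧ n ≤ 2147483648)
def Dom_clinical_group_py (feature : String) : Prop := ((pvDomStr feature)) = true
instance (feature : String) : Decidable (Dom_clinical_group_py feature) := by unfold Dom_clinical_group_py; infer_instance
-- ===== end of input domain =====

-- B replaces A's linear scan over the groups dict by binary search over one flat
-- (feature, group) table sorted by key — a different algorithm of similar cost.

-- ===== PORT A =====
-- the literal `groups` dict of A, in declaration order
def pvGroupsA : List (String × List String) := [
  ("blood_pressure", ["systolic_bp", "diastolic_bp", "bp_pulse_pressure", "bp_stage", "bp_hypertension_flag", "bp_category_enc"]),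
  ("metabolic", ["bmi", "bmi_category_enc", "abdominal_circ_cm", "metabolic_syndrome_score", "weight_kg"]),
  ("glucose", ["fasting_glucose", "glucose_category_enc", "diabetes_enc"]),
  ("lipids", ["total_cholesterol", "hdl", "estimated_ldl", "chol_hdl_ratio"]),
  ("lifestyle", ["smoking_enc", "activity_enc", "family_history_cvd"]),
  ("demographics", ["age", "sex_enc", "age_group_risk_multiplier"]),
  ("population", ["pop_bp_prevalence", "pop_diabetes_prevalence", "pop_obesity_prevalence", "pop_physical_inactivity", "pop_tobacco_prevalence", "wb_urban_pct", "wb_health_expenditure_gdp", "wb_diabetes_prevalence"]),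
  ("environment", ["pm25_latest", "pm10_latest", "no2_latest", "o3_latest"])]

-- A's `for group, features in groups.items(): if feature in features: return group` / `return "other"`
def pvScanA (feature : String) : List (String × List String) → String
  | [] => "other"
  | (group, features) :: rest =>
      if features.contains feature then group else pvScanA feature rest

def clinical_group_py (feature : String) : String := pvScanA feature pvGroupsA

-- ===== PORT B =====
-- B's module-level `_TABLE`, the flat (feature, group) pairs sorted by feature name
def pvTableB : List (String × String) := [
  ("abdominal_circ_cm", "metabolic"),
  ("activity_enc", "lifestyle"),
  ("age", "demographics"),
  ("age_group_risk_multiplier", "demographics"),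
  ("bmi", "metabolic"),
  ("bmi_category_enc", "metabolic"),
  ("bp_category_enc", "blood_pressure"),
  ("bp_hypertension_flag", "blood_pressure"),
  ("bp_pulse_pressure", "blood_pressure"),
  ("bp_stage", "blood_pressure"),
  ("chol_hdl_ratio", "lipids"),
  ("diabetes_enc", "glucose"),
  ("diastolic_bp", "blood_pressure"),
  ("estimated_ldl", "lipids"),
  ("family_history_cvd", "lifestyle"),
  ("fasting_glucose", "glucose"),
  ("glucose_category_enc", "glucose"),
  ("hdl", "lipids"),
  ("metabolic_syndrome_score", "metabolic"),
  ("no2_latest", "environment"),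
  ("o3_latest", "environment"),
  ("pm10_latest", "environment"),
  ("pm25_latest", "environment"),
  ("pop_bp_prevalence", "population"),
  ("pop_diabetes_prevalence", "population"),
  ("pop_obesity_prevalence", "population"),
  ("pop_physical_inactivity", "population"),
  ("pop_tobacco_prevalence", "population"),
  ("sex_enc", "demographics"),
  ("smoking_enc", "lifestyle"),
  ("systolic_bp", "blood_pressure"),
  ("total_cholesterol", "lipids"),
  ("wb_diabetes_prevalence", "population"),
  ("wb_health_expenditure_gdp", "population"),
  ("wb_urban_pct", "population"),
  ("weight_kg", "metabolic")]

-- B's recursive `_bsearch` (fuel = table length makes the recursion structural;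
-- with fuel ≥ table.length the fuel branch is never taken)
def pvBsearch (feature : String) : Nat → List (String × String) → String
  | _, [] => "other"
  | 0, _ :: _ => "other"
  | fuel + 1, table =>
      let mid := table.length / 2
      let p := table.getD mid ("", "")
      if feature.toList == p.1.toList then p.2
      -- Python `s < t` / `s == t` on str = `<` / `=` on .toList (PYSEM str-comparison bridge)
      else if feature.toList < p.1.toList then pvBsearch feature fuel (table.take mid)
      else pvBsearch feature fuel (table.drop (mid + 1))

def clinical_group_py_alt (feature : String) : String :=
  pvBsearch feature pvTableB.length pvTableB

-- ===== PRECONDITION & SPEC =====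
def Spec_clinical_group_py (feature : String) (out : String) : Prop := out = clinical_group_py_alt feature
instance (feature : String) (out : String) : Decidable (Spec_clinical_group_py feature out) := by unfold Spec_clinical_group_py; infer_instance

-- ===== CLAIM (what is proved, stated in full; the proofs are below) =====
def Claim_equal_clinical_group_py : Prop := ∀ (feature : String), Dom_clinical_group_py feature → Spec_clinical_group_py feature (clinical_group_py feature)

-- ===== LEMMAS AND PROOFS =====

-- all feature names of A, in A's order
def pvAllFeatures : List String := pvGroupsA.flatMap (fun p => p.2)

-- if the searched name is no key of the table, binary search returns "other"
theorem pv_bsearch_notmem (feature : String) (fuel : Nat) :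
    ∀ (table : List (String × String)), (∀ p ∈ table, p.1 ≠ feature) →
      pvBsearch feature fuel table = "other" := by
  induction fuel with
  | zero =>
      intro table _
      cases table <;> simp [pvBsearch]
  | succ n ih =>
      intro table h
      cases htab : table with
      | nil => simp [pvBsearch]
      | cons q rest =>
        subst htab
        simp only [pvBsearch]
        have hmidlt : (q :: rest).length / 2 < (q :: rest).length := by
          simp only [List.length_cons]; omega
        have hmem : (q :: rest).getD ((q :: rest).length / 2) ("", "") ∈ q :: rest := by
          rw [List.getD_eq_getElem ((q :: rest)) ("", "") hmidlt]
          exact List.getElem_mem hmidlt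
        have hne : ((q :: rest).getD ((q :: rest).length / 2) ("", "")).1 ≠ feature :=
          h _ hmem
        have hbe : (feature.toList == ((q :: rest).getD ((q :: rest).length / 2) ("", "")).1.toList) = false := by
          simp only [beq_eq_false_iff_ne, ne_eq]
          intro e
          exact hne ((String.toList_inj.mp e).symm)
        simp only [hbe, Bool.false_eq_true, if_false]
        split
        · exact ih _ (fun p hp => h p (List.mem_of_mem_take hp))
        · exact ih _ (fun p hp => h p (List.mem_of_mem_drop hp))

-- if the searched name is in none of the group lists, A's scan returns "other"
theorem pv_scan_notmem (feature : String) :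
    ∀ (gs : List (String × List String)), (∀ p ∈ gs, feature ∉ p.2) →
      pvScanA feature gs = "other" := by
  intro gs
  induction gs with
  | nil => intro _; rfl
  | cons q rest ih =>
      intro h
      have h1 : feature ∉ q.2 := h q (List.mem_cons_self)
      have hc : q.2.contains feature = false := by
        simpa using h1
      obtain ⟨g, fs⟩ := q
      simp only [pvScanA, hc, Bool.false_eq_true, if_false]
      exact ih (fun p hp => h p (List.mem_cons_of_mem _ hp))

-- the table's keys are exactly A's feature names (we only need ⊆), checked by computation
theorem pv_keys_sub : ∀ p ∈ pvTableB, p.1 ∈ pvAllFeatures := by decide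

-- on every feature name of A, the two programs agree, checked by computation
theorem pv_agree : ∀ k ∈ pvAllFeatures,
    pvScanA k pvGroupsA = pvBsearch k pvTableB.length pvTableB := by decide

-- ===== VERDICT (by name: the statement is the Claim_ definition above) =====
theorem clinical_group_py_spec : Claim_equal_clinical_group_py := by
  intro feature _
  unfold Spec_clinical_group_py clinical_group_py clinical_group_py_alt
  by_cases h : feature ∈ pvAllFeatures
  · exact pv_agree feature h
  · rw [pv_scan_notmem feature pvGroupsA
      (fun p hp hmem => h (List.mem_flatMap.mpr ⟨p, hp, hmem⟩)),
      pv_bsearch_notmem feature pvTableB.length pvTableB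
      (fun p hp e => h (e ▸ pv_keys_sub p hp))]
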